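-- pv_equiv track=rewrite | github.com/rtdickerson/starr_reporter | tests/parsing_test.py | findMissalignedSections
-- ===== SOURCE A (Python) =====
-- def findMissalignedSections(SECTS, TDATA):
--     inSects = []
--     inTdata = []
--     for SECT in SECTS:
--         FND = False
--         for TX in TDATA:
--             if SECT[1].startswith(TX[1]):
--                 FND = True
--                 break
--         if not FND:
--             inSects.append(SECT[1])
--     for TX in TDATA:
--         FND = False
--         for SECT in SECTS:
--             if TX[1].startswith(SECT[1]):
--                 FND = True
--                 break
--         if not FND:
--             inTdata.append(TX[1])
--     return inSects, inTdata
-- ===== SOURCE B (Python) =====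
-- def findMissalignedSections(SECTS, TDATA):
--     # Build a hash set of the candidate prefixes once; test each string by walking
--     # it left-to-right, checking each of its prefixes for set membership.
--     tvals = {TX[1] for TX in TDATA}
--     svals = {SECT[1] for SECT in SECTS}
--
--     def has_prefix_in(s, pool):
--         p = ""
--         if p in pool:
--             return True
--         for ch in s:
--             p += ch
--             if p in pool:
--                 return True
--         return False
--
--     inSects = [SECT[1] for SECT in SECTS if not has_prefix_in(SECT[1], tvals)]
--     inTdata = [TX[1] for TX in TDATA if not has_prefix_in(TX[1], svals)]
--     return inSects, inTdata
-- ===== Notes on version B (the rewrite author's own statement) =====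
-- stated objective: alternative
-- what changed: Replaced the per-element scan of the other list (testing startswith against every string) by a hash set of candidate prefixes built once, querying each string by walking it and testing each of its prefixes for set membership.
import Mathlib
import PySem

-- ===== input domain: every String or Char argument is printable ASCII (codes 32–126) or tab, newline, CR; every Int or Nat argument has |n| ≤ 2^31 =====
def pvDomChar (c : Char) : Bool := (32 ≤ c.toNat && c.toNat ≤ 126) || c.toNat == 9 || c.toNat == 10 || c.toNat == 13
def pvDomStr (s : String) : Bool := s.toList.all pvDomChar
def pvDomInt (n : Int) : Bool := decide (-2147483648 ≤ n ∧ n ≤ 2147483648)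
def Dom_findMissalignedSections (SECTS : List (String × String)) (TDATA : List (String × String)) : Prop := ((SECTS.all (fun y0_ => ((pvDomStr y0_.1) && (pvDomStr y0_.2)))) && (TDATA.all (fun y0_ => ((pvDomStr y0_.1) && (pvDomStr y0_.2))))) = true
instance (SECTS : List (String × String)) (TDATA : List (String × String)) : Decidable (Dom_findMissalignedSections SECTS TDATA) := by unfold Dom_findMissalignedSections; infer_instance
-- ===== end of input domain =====

-- B replaces A's nested scan of the other list with a hash set of candidate
-- prefixes queried once per string (objective: alternative algorithm, same cost).

-- ===== PORT A =====
-- inner 'for … if …startswith…: FND = True; break' loop of A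
def pvInnerA (s : String) : List (String × String) → Bool
  | [] => false
  | TX :: rest => if PySem.Str.startswith s TX.2 then true else pvInnerA s rest

def findMissalignedSections (SECTS : List (String × String)) (TDATA : List (String × String)) : List String × List String :=
  let inSects := SECTS.foldl (fun acc SECT => if pvInnerA SECT.2 TDATA then acc else acc ++ [SECT.2]) []
  let inTdata := TDATA.foldl (fun acc TX => if pvInnerA TX.2 SECTS then acc else acc ++ [TX.2]) []
  (inSects, inTdata)

-- ===== PORT B =====
-- has_prefix_in: walk s, growing prefix p, testing set membership at each step
def pvWalkB (pool : PySem.Set (List Char)) (p : List Char) : List Char → Bool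
  | [] => if pool.contains p then true else false
  | c :: cs => if pool.contains p then true else pvWalkB pool (p ++ [c]) cs

def pvHasPrefixIn (s : String) (pool : PySem.Set (List Char)) : Bool :=
  pvWalkB pool [] s.toList

def findMissalignedSections_alt (SECTS : List (String × String)) (TDATA : List (String × String)) : List String × List String :=
  let tvals := PySem.Set.ofList (TDATA.map (fun TX => TX.2.toList))
  let svals := PySem.Set.ofList (SECTS.map (fun SECT => SECT.2.toList))
  let inSects := (SECTS.filter (fun SECT => !pvHasPrefixIn SECT.2 tvals)).map (fun SECT => SECT.2)
  let inTdata := (TDATA.filter (fun TX => !pvHasPrefixIn TX.2 svals)).map (fun TX => TX.2)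
  (inSects, inTdata)

-- ===== PRECONDITION & SPEC =====
def Spec_findMissalignedSections (SECTS : List (String × String)) (TDATA : List (String × String)) (out : List String × List String) : Prop := out = findMissalignedSections_alt SECTS TDATA
instance (SECTS : List (String × String)) (TDATA : List (String × String)) (out : List String × List String) : Decidable (Spec_findMissalignedSections SECTS TDATA out) := by unfold Spec_findMissalignedSections; infer_instance

-- ===== CLAIM (what is proved, stated in full; the proofs are below) =====
def Claim_equal_findMissalignedSections : Prop := ∀ (SECTS : List (String × String)) (TDATA : List (String × String)), Dom_findMissalignedSections SECTS TDATA → Spec_findMissalignedSections SECTS TDATA (findMissalignedSections SECTS TDATA)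

-- ===== LEMMAS AND PROOFS =====

theorem pvWalkB_iff (pool : PySem.Set (List Char)) (p rest : List Char) :
    pvWalkB pool p rest = true ↔ ∃ q, q <+: rest ∧ (p ++ q) ∈ pool := by
  induction rest generalizing p with
  | nil =>
    unfold pvWalkB
    by_cases h : pool.contains p
    · rw [if_pos h]
      have hp : p ∈ pool := by simpa [PySem.Set.contains] using h
      exact ⟨fun _ => ⟨[], List.prefix_refl _, by simpa using hp⟩, fun _ => rfl⟩
    · rw [if_neg h]
      constructor
      · intro hc; exact absurd hc (by simp)
      · rintro ⟨q, hq, hm⟩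
        rw [List.prefix_nil.mp hq] at hm
        exact absurd (by simpa [PySem.Set.contains] using hm) h
  | cons c cs ih =>
    unfold pvWalkB
    by_cases h : pool.contains p
    · rw [if_pos h]
      have hp : p ∈ pool := by simpa [PySem.Set.contains] using h
      exact ⟨fun _ => ⟨[], List.nil_prefix, by simpa using hp⟩, fun _ => rfl⟩
    · rw [if_neg h, ih]
      constructor
      · rintro ⟨q, hq, hm⟩
        exact ⟨c :: q, List.cons_prefix_cons.mpr ⟨rfl, hq⟩, by simpa using hm⟩
      · rintro ⟨q, hq, hm⟩
        cases q with
        | nil =>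
          rw [List.append_nil] at hm
          exact absurd (by simpa [PySem.Set.contains] using hm) h
        | cons c' q' =>
          obtain ⟨hc, hq'⟩ := List.cons_prefix_cons.mp hq
          subst hc
          exact ⟨q', hq', by simpa using hm⟩

theorem pvInnerA_iff (s : String) (l : List (String × String)) :
    pvInnerA s l = true ↔ ∃ TX ∈ l, TX.2.toList <+: s.toList := by
  induction l with
  | nil => simp [pvInnerA]
  | cons TX rest ih =>
    unfold pvInnerA
    by_cases h : PySem.Str.startswith s TX.2 = true
    · rw [if_pos h]
      have hpre : TX.2.toList <+: s.toList := by
        rw [PySem.Str.startswith_eq] at h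
        exact (PySem.Chars.startswith_iff _ _).mp h
      exact ⟨fun _ => ⟨TX, List.mem_cons_self, hpre⟩, fun _ => rfl⟩
    · rw [if_neg h, ih]
      constructor
      · rintro ⟨TX', hmem, hpre⟩; exact ⟨TX', List.mem_cons_of_mem _ hmem, hpre⟩
      · rintro ⟨TX', hmem, hpre⟩
        rcases List.mem_cons.mp hmem with rfl | hmem'
        · exact absurd (by rw [PySem.Str.startswith_eq]; exact (PySem.Chars.startswith_iff _ _).mpr hpre) h
        · exact ⟨TX', hmem', hpre⟩

theorem pvInnerA_eq_hasPrefixIn (s : String) (l : List (String × String)) :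
    pvInnerA s l = pvHasPrefixIn s (PySem.Set.ofList (l.map (fun TX => TX.2.toList))) := by
  have hiff : pvInnerA s l = true ↔
      pvHasPrefixIn s (PySem.Set.ofList (l.map (fun TX => TX.2.toList))) = true := by
    rw [pvInnerA_iff, pvHasPrefixIn, pvWalkB_iff]
    constructor
    · rintro ⟨TX, hmem, hpre⟩
      exact ⟨TX.2.toList, hpre, by
        rw [List.nil_append, PySem.Set.mem_ofList]
        exact List.mem_map.mpr ⟨TX, hmem, rfl⟩⟩
    · rintro ⟨q, hq, hm⟩
      rw [List.nil_append, PySem.Set.mem_ofList] at hm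
      obtain ⟨TX, hmem, rfl⟩ := List.mem_map.mp hm
      exact ⟨TX, hmem, hq⟩
  rcases hb : pvInnerA s l with _ | _
  · rcases hc : pvHasPrefixIn s (PySem.Set.ofList (l.map (fun TX => TX.2.toList))) with _ | _
    · rw [hc]
    · rw [hb] at hiff; rw [hc] at hiff; exact absurd (hiff.mpr rfl) (by simp)
  · rw [hb] at hiff; exact (hiff.mp rfl).symm

theorem pvLoopA_eq (l pool : List (String × String)) :
    l.foldl (fun acc x => if pvInnerA x.2 pool then acc else acc ++ [x.2]) [] =
    (l.filter (fun x => !pvHasPrefixIn x.2 (PySem.Set.ofList (pool.map (fun TX => TX.2.toList))))).map (fun x => x.2) := by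
  have hcongr : l.foldl (fun acc x => if pvInnerA x.2 pool then acc else acc ++ [x.2]) [] =
      l.foldl (fun acc x => if (!pvHasPrefixIn x.2 (PySem.Set.ofList (pool.map (fun TX => TX.2.toList)))) = true then acc ++ [x.2] else acc) [] := by
    apply PySem.List.foldl_congr_mem
    intro acc x _
    rw [pvInnerA_eq_hasPrefixIn]
    cases pvHasPrefixIn x.2 (PySem.Set.ofList (pool.map (fun TX => TX.2.toList))) <;> simp
  rw [hcongr, PySem.List.foldl_append_if, List.nil_append]

-- ===== VERDICT (by name: the statement is the Claim_ definition above) =====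
theorem findMissalignedSections_spec : Claim_equal_findMissalignedSections := by
  intro SECTS TDATA _
  unfold Spec_findMissalignedSections findMissalignedSections findMissalignedSections_alt
  rw [pvLoopA_eq SECTS TDATA, pvLoopA_eq TDATA SECTS]
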